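-- pv_equiv track=rewrite | github.com/Yuerden/Universal-Patterns-in-Non-Collapsible-Networks | Simulation_Scripts/unlimited_flow.py | optimize_power_distribution_refined
-- ===== SOURCE A (Python) =====
-- def optimize_power_distribution_refined(bipartite_graph, component_demands, generation):
--     """
--     Optimizes power distribution, prioritizing components with the least number of generators
--     and generators with the least number of connections.
--
--     Args:
--         bipartite_graph: Dictionary representing the bipartite graph.
--                          Keys are generators, values are lists of connected components.
--         component_demands: List of total demands for each load component.
--         generation: List of generator capacities.
--
--     Returns:
--         allocation: 2D list where allocation[i][j] is the power allocated from generator i to component j.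
--         total_power_delivered: Total power successfully delivered to all components.
--     """
--     num_generators = len(generation)
--     num_components = len(component_demands)
--
--     # Initialize allocation matrix
--     allocation = [[0] * num_components for _ in range(num_generators)]
--
--     # Remaining capacity of generators and demands of components
--     remaining_gen = generation[:]
--     remaining_demand = component_demands[:]
--
--     # Step 1: Calculate generator availability for each component
--     component_to_generators = {comp: [] for comp in range(num_components)}
--     generator_to_components = {gen: [] for gen in range(num_generators)}
--
--     for gen_index, gen_node in enumerate(bipartite_graph.keys()):
--         for comp_index in bipartite_graph[gen_node]:
--             component_to_generators[comp_index].append(gen_index)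
--             generator_to_components[gen_index].append(comp_index)
--
--     # Step 2: Sort components by number of connected generators (ascending order)
--     sorted_components = sorted(component_to_generators.keys(), key=lambda c: len(component_to_generators[c]))
--
--     # Step 3: Allocate power prioritizing generator connections
--     for comp_index in sorted_components:
--         # Sort generators connected to this component by the number of other components they serve (ascending order)
--         sorted_generators = sorted(component_to_generators[comp_index],
--                                    key=lambda g: len(generator_to_components[g]))
--
--         for gen_index in sorted_generators:
--             if remaining_gen[gen_index] <= 0 or remaining_demand[comp_index] <= 0:
--                 continue
--
--             # Allocate power
--             power_to_transfer = min(remaining_gen[gen_index], remaining_demand[comp_index])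
--             allocation[gen_index][comp_index] += power_to_transfer
--             remaining_gen[gen_index] -= power_to_transfer
--             remaining_demand[comp_index] -= power_to_transfer
--
--     # Calculate total power delivered
--     total_power_delivered = sum(
--         component_demands[i] - remaining_demand[i] for i in range(num_components)
--     )
--
--     return allocation, total_power_delivered
-- ===== SOURCE B (Python) =====
-- def optimize_power_distribution_refined(bipartite_graph, component_demands, generation):
--     num_generators = len(generation)
--     num_components = len(component_demands)
--
--     # One flat list of (component, generator-index) edge occurrences, in input order.
--     edges = []
--     for gen_index, gen_node in enumerate(bipartite_graph.keys()):
--         for comp_index in bipartite_graph[gen_node]: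
--             edges.append((comp_index, gen_index))
--
--     # Degrees (edge occurrences counted), in one pass over the flat list.
--     comp_degree = [0] * num_components
--     gen_degree = [0] * num_generators
--     for comp_index, gen_index in edges:
--         comp_degree[comp_index] += 1
--         gen_degree[gen_index] += 1
--
--     # Multi-key ordering by three successive STABLE passes (least-significant key first):
--     # the result is ordered by (comp_degree[comp], comp, gen_degree[gen]).
--     edges = sorted(edges, key=lambda e: gen_degree[e[1]])
--     edges = sorted(edges, key=lambda e: e[0])
--     edges = sorted(edges, key=lambda e: comp_degree[e[0]])
--
--     # Single flat greedy pass over the globally ordered edge list.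
--     allocation = [[0] * num_components for _ in range(num_generators)]
--     remaining_gen = generation[:]
--     remaining_demand = component_demands[:]
--     for comp_index, gen_index in edges:
--         transfer = min(remaining_gen[gen_index], remaining_demand[comp_index])
--         if transfer > 0:
--             allocation[gen_index][comp_index] += transfer
--             remaining_gen[gen_index] -= transfer
--             remaining_demand[comp_index] -= transfer
--
--     total_power_delivered = sum(
--         component_demands[i] - remaining_demand[i] for i in range(num_components)
--     )
--     return allocation, total_power_delivered
-- ===== Notes on version B (the rewrite author's own statement) =====
-- stated objective: alternative
-- what changed: Replaces A's two adjacency dicts, component-level sort and per-component generator sorts with nested allocation loops by: one flat (component, generator) edge list, degree counters, a three-pass stable multi-key sort of that single list (by gen degree, then component index, then component degree), and ONE flat greedy loop over the globally ordered edges.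
import Mathlib
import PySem

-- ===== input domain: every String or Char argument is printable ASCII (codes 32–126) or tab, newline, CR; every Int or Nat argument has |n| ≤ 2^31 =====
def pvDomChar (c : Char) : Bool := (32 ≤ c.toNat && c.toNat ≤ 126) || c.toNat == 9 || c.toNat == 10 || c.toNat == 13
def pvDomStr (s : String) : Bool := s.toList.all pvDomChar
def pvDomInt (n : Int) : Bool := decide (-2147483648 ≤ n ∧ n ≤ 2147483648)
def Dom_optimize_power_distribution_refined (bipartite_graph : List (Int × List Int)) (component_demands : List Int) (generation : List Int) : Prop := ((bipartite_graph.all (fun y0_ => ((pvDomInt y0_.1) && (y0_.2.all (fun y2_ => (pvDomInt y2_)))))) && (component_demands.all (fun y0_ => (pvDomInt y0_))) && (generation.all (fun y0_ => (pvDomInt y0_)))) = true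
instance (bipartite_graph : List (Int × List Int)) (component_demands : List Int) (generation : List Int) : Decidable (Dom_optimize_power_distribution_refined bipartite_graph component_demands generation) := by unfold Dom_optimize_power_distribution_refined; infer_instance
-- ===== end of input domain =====

-- B replaces A's two adjacency dicts, component sort, per-component generator sorts and nested
-- allocation loops by one flat edge list, degree counters, a three-pass stable multi-key sort of
-- that single list, and one flat greedy loop over the globally ordered edges.

-- ===== PORT A =====
def optimize_power_distribution_refined (bipartite_graph : List (Int × List Int)) (component_demands : List Int) (generation : List Int) : List (List Int) × Int :=
  let num_generators := PySem.List.len generation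
  let num_components := PySem.List.len component_demands
  -- allocation = [[0] * num_components for _ in range(num_generators)]
  let allocation : List (List Int) :=
    (PySem.List.pyRange 0 num_generators 1).map (fun _ => PySem.List.pyRepeat [(0:Int)] num_components)
  let remaining_gen := generation
  let remaining_demand := component_demands
  let d := PySem.Dict.ofList bipartite_graph
  -- component_to_generators = {comp: [] for comp in range(num_components)}
  let ctz0 : PySem.Dict Int (List Int) :=
    (PySem.List.pyRange 0 num_components 1).foldl (fun acc c => acc.insert c []) PySem.Dict.empty
  -- generator_to_components = {gen: [] for gen in range(num_generators)}
  let gtz0 : PySem.Dict Int (List Int) :=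
    (PySem.List.pyRange 0 num_generators 1).foldl (fun acc g => acc.insert g []) PySem.Dict.empty
  -- for gen_index, gen_node in enumerate(bipartite_graph.keys()): for comp_index in bipartite_graph[gen_node]: append to both
  -- (Dict.modify is exact here since Pre_ makes every touched key present; on a missing key Python raises KeyError)
  let maps := (PySem.List.enumerate d.keys 0).foldl (fun st t =>
      (d.getD t.2 []).foldl (fun st c =>
        (st.1.modify c [] (fun l => l ++ [t.1]), st.2.modify t.1 [] (fun l => l ++ [c]))) st)
    (ctz0, gtz0)
  let ctz := maps.1
  let gtz := maps.2
  let sorted_components := PySem.List.sorted ctz.keys (fun c => PySem.List.len (ctz.getD c []))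
  -- list indexing is exact under Pre_ (all indices in range); pyGetD/pySetD used with in-range indices
  let final := sorted_components.foldl (fun st comp =>
      let sorted_generators := PySem.List.sorted (ctz.getD comp []) (fun g => PySem.List.len (gtz.getD g []))
      sorted_generators.foldl (fun st g =>
        if PySem.List.pyGetD st.2.1 g 0 ≤ 0 ∨ PySem.List.pyGetD st.2.2 comp 0 ≤ 0 then st
        else
          let power := min (PySem.List.pyGetD st.2.1 g 0) (PySem.List.pyGetD st.2.2 comp 0)
          (PySem.List.pySetD st.1 g
             (PySem.List.pySetD (PySem.List.pyGetD st.1 g []) comp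
               (PySem.List.pyGetD (PySem.List.pyGetD st.1 g []) comp 0 + power)),
           PySem.List.pySetD st.2.1 g (PySem.List.pyGetD st.2.1 g 0 - power),
           PySem.List.pySetD st.2.2 comp (PySem.List.pyGetD st.2.2 comp 0 - power))) st)
    (allocation, remaining_gen, remaining_demand)
  let total := (PySem.List.pyRange 0 num_components 1).foldl
    (fun acc i => acc + (PySem.List.pyGetD component_demands i 0 - PySem.List.pyGetD final.2.2 i 0)) 0
  (final.1, total)

-- ===== PORT B =====
def optimize_power_distribution_refined_alt (bipartite_graph : List (Int × List Int)) (component_demands : List Int) (generation : List Int) : List (List Int) × Int :=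
  let num_generators := PySem.List.len generation
  let num_components := PySem.List.len component_demands
  let d := PySem.Dict.ofList bipartite_graph
  -- flat (component, generator) edge list, input order
  let edges : List (Int × Int) := (PySem.List.enumerate d.keys 0).foldl (fun acc t =>
      (d.getD t.2 []).foldl (fun acc c => acc ++ [(c, t.1)]) acc) []
  -- degree counting (list indexing exact under Pre_: all indices in range)
  let degs := edges.foldl (fun st e =>
      (PySem.List.pySetD st.1 e.1 (PySem.List.pyGetD st.1 e.1 0 + 1),
       PySem.List.pySetD st.2 e.2 (PySem.List.pyGetD st.2 e.2 0 + 1)))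
    (PySem.List.pyRepeat [(0:Int)] num_components, PySem.List.pyRepeat [(0:Int)] num_generators)
  let comp_degree := degs.1
  let gen_degree := degs.2
  -- three successive STABLE passes = one ordering by (comp_degree[c], c, gen_degree[g])
  let edges1 := PySem.List.sorted edges (fun e => PySem.List.pyGetD gen_degree e.2 0)
  let edges2 := PySem.List.sorted edges1 (fun e => e.1)
  let edges3 := PySem.List.sorted edges2 (fun e => PySem.List.pyGetD comp_degree e.1 0)
  let allocation : List (List Int) :=
    (PySem.List.pyRange 0 num_generators 1).map (fun _ => PySem.List.pyRepeat [(0:Int)] num_components)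
  -- single flat greedy pass over the ordered edges
  let final := edges3.foldl (fun st e =>
      let transfer := min (PySem.List.pyGetD st.2.1 e.2 0) (PySem.List.pyGetD st.2.2 e.1 0)
      if 0 < transfer then
        (PySem.List.pySetD st.1 e.2
           (PySem.List.pySetD (PySem.List.pyGetD st.1 e.2 []) e.1
             (PySem.List.pyGetD (PySem.List.pyGetD st.1 e.2 []) e.1 0 + transfer)),
         PySem.List.pySetD st.2.1 e.2 (PySem.List.pyGetD st.2.1 e.2 0 - transfer),
         PySem.List.pySetD st.2.2 e.1 (PySem.List.pyGetD st.2.2 e.1 0 - transfer))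
      else st)
    (allocation, generation, component_demands)
  let total := (PySem.List.pyRange 0 num_components 1).foldl
    (fun acc i => acc + (PySem.List.pyGetD component_demands i 0 - PySem.List.pyGetD final.2.2 i 0)) 0
  (final.1, total)

-- ===== PRECONDITION & SPEC =====
-- Pre_ holds exactly when Python A returns normally: every component index in an (effective, i.e.
-- after dict key deduplication) adjacency list is a valid index into component_demands, and every
-- generator whose adjacency list is non-empty has its enumeration index inside generation
-- (otherwise A raises KeyError / IndexError).
def Pre_optimize_power_distribution_refined (bipartite_graph : List (Int × List Int)) (component_demands : List Int) (generation : List Int) : Prop :=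
  ∀ t ∈ PySem.List.enumerate (PySem.Dict.ofList bipartite_graph).items 0,
    ∀ c ∈ t.2.2, (0 ≤ c ∧ c < PySem.List.len component_demands) ∧ t.1 < PySem.List.len generation
instance (bipartite_graph : List (Int × List Int)) (component_demands : List Int) (generation : List Int) : Decidable (Pre_optimize_power_distribution_refined bipartite_graph component_demands generation) := by unfold Pre_optimize_power_distribution_refined; infer_instance

def pvWitness_optimize_power_distribution_refined : (List (Int × List Int)) × List Int × List Int :=
  ([(5, [0, 1]), (7, [1]), (9, [1, 1, 0])], [3, 4], [10, 2, 6])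

def Spec_optimize_power_distribution_refined (bipartite_graph : List (Int × List Int)) (component_demands : List Int) (generation : List Int) (out : List (List Int) × Int) : Prop := out = optimize_power_distribution_refined_alt bipartite_graph component_demands generation
instance (bipartite_graph : List (Int × List Int)) (component_demands : List Int) (generation : List Int) (out : List (List Int) × Int) : Decidable (Spec_optimize_power_distribution_refined bipartite_graph component_demands generation out) := by unfold Spec_optimize_power_distribution_refined; infer_instance

-- ===== CLAIM (what is proved, stated in full; the proofs are below) =====
def Claim_equal_optimize_power_distribution_refined : Prop := ∀ (bipartite_graph : List (Int × List Int)) (component_demands : List Int) (generation : List Int), Dom_optimize_power_distribution_refined bipartite_graph component_demands generation → Pre_optimize_power_distribution_refined bipartite_graph component_demands generation → Spec_optimize_power_distribution_refined bipartite_graph component_demands generation (optimize_power_distribution_refined bipartite_graph component_demands generation)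

-- ===== LEMMAS AND PROOFS =====

-- Canonical middle form shared by both equivalence proofs.
def pvStep (comp : Int) (st : List (List Int) × List Int × List Int) (g : Int) : List (List Int) × List Int × List Int :=
  let transfer := min (PySem.List.pyGetD st.2.1 g 0) (PySem.List.pyGetD st.2.2 comp 0)
  if 0 < transfer then
    (PySem.List.pySetD st.1 g
       (PySem.List.pySetD (PySem.List.pyGetD st.1 g []) comp
         (PySem.List.pyGetD (PySem.List.pyGetD st.1 g []) comp 0 + transfer)),
     PySem.List.pySetD st.2.1 g (PySem.List.pyGetD st.2.1 g 0 - transfer),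
     PySem.List.pySetD st.2.2 comp (PySem.List.pyGetD st.2.2 comp 0 - transfer))
  else st

def pvE (bipartite_graph : List (Int × List Int)) : List (Int × Int) :=
  (PySem.List.enumerate (PySem.Dict.ofList bipartite_graph).keys 0).flatMap
    (fun t => ((PySem.Dict.ofList bipartite_graph).getD t.2 []).map (fun c => (c, t.1)))

def pvCG (bipartite_graph : List (Int × List Int)) (c : Int) : List Int :=
  ((pvE bipartite_graph).filter (fun e => e.1 == c)).map (fun e => e.2)

def pvCD (bipartite_graph : List (Int × List Int)) (c : Int) : Int :=
  ((pvCG bipartite_graph c).length : Int)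

def pvGD (bipartite_graph : List (Int × List Int)) (g : Int) : Int :=
  (((pvE bipartite_graph).countP (fun e => e.2 == g)) : Int)

def pvB (bipartite_graph : List (Int × List Int)) : Int := PySem.List.len (pvE bipartite_graph) + 1

def pvGenOrder (bipartite_graph : List (Int × List Int)) (c : Int) : List Int :=
  (PySem.List.pyRange 0 (pvB bipartite_graph) 1).flatMap
    (fun v => (pvCG bipartite_graph c).filter (fun g => pvGD bipartite_graph g == v))

def pvCompOrder (bipartite_graph : List (Int × List Int)) (component_demands : List Int) : List Int :=
  (PySem.List.pyRange 0 (pvB bipartite_graph) 1).flatMap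
    (fun v => (PySem.List.pyRange 0 (PySem.List.len component_demands) 1).filter
      (fun c => pvCD bipartite_graph c == v))

def pvCanon (bipartite_graph : List (Int × List Int)) (component_demands : List Int) (generation : List Int) : List (List Int) × Int :=
  let nc := PySem.List.len component_demands
  let alloc0 : List (List Int) :=
    (PySem.List.pyRange 0 (PySem.List.len generation) 1).map (fun _ => PySem.List.pyRepeat [(0:Int)] nc)
  let final := (pvCompOrder bipartite_graph component_demands).foldl
    (fun st comp => (pvGenOrder bipartite_graph comp).foldl (pvStep comp) st)
    (alloc0, generation, component_demands)
  (final.1, (PySem.List.pyRange 0 nc 1).foldl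
    (fun acc i => acc + (PySem.List.pyGetD component_demands i 0 - PySem.List.pyGetD final.2.2 i 0)) 0)

-- insertBy inserts after every element it is not "before" and before the rest.
theorem pv_insertBy_split {α : Type} (before : α → α → Bool) (x : α) (P Q : List α)
    (hP : ∀ y ∈ P, before x y = false) (hQ : ∀ y ∈ Q, before x y = true) :
    PySem.List.insertBy before x (P ++ Q) = P ++ x :: Q := by
  induction P with
  | nil =>
    cases Q with
    | nil => rfl
    | cons q qs => simp [PySem.List.insertBy, hQ q (by simp)]
  | cons p P ih =>
    have hp : before x p = false := hP p (by simp)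
    simp only [List.cons_append, PySem.List.insertBy, hp, Bool.false_eq_true, if_false]
    exact congrArg (p :: ·) (ih (fun y hy => hP y (by simp [hy])))

-- A stable sort by an Int key bounded by B is the concatenation of its key buckets.
theorem pv_bucket_sorted {α : Type} (xs : List α) (key : α → Int) (B : Int)
    (h : ∀ x ∈ xs, 0 ≤ key x ∧ key x < B) (_hB : 0 ≤ B) :
    PySem.List.sorted xs key =
      (PySem.List.pyRange 0 B 1).flatMap (fun v => xs.filter (fun x => key x == v)) := by
  induction xs using List.reverseRecOn with
  | nil =>
    have h1 : PySem.List.sorted ([] : List α) key = [] := by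
      rw [PySem.List.sorted_eq_foldl_insertBy]; rfl
    rw [h1]; symm
    rw [List.flatMap_eq_nil_iff]; simp
  | append_singleton xs x ih =>
    have hx := h x (by simp)
    have hxs : ∀ y ∈ xs, 0 ≤ key y ∧ key y < B := fun y hy => h y (by simp [hy])
    have hsplit : PySem.List.sorted (xs ++ [x]) key =
        PySem.List.insertBy (fun a b => decide (key a < key b)) x (PySem.List.sorted xs key) := by
      rw [PySem.List.sorted_eq_foldl_insertBy, List.foldl_append, ← PySem.List.sorted_eq_foldl_insertBy]
      rfl
    set k := key x with hk
    have hr1 : PySem.List.pyRange 0 B 1 =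
        PySem.List.pyRange 0 (k+1) 1 ++ PySem.List.pyRange (k+1) B 1 :=
      PySem.List.pyRange_one_append 0 (k+1) B (by omega) (by omega)
    have hr2 : PySem.List.pyRange 0 (k+1) 1 =
        PySem.List.pyRange 0 k 1 ++ [k] := by
      rw [PySem.List.pyRange_one_append 0 k (k+1) (by omega) (by omega), PySem.List.pyRange_one_singleton]
    have hbL : ∀ v ∈ PySem.List.pyRange 0 k 1,
        (xs ++ [x]).filter (fun y => key y == v) = xs.filter (fun y => key y == v) := by
      intro v hv
      rw [PySem.List.mem_pyRange_one] at hv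
      have : (key x == v) = false := by rw [beq_eq_false_iff_ne]; omega
      simp [List.filter_append, this]
    have hbR : ∀ v ∈ PySem.List.pyRange (k+1) B 1,
        (xs ++ [x]).filter (fun y => key y == v) = xs.filter (fun y => key y == v) := by
      intro v hv
      rw [PySem.List.mem_pyRange_one] at hv
      have : (key x == v) = false := by rw [beq_eq_false_iff_ne]; omega
      simp [List.filter_append, this]
    have hbM : (xs ++ [x]).filter (fun y => key y == k) = xs.filter (fun y => key y == k) ++ [x] := by
      have hkk : (key x == k) = true := by rw [beq_iff_eq]
      rw [List.filter_append]
      simp only [List.filter_cons, hkk, if_true, List.filter_nil]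
    rw [hsplit, ih hxs]
    rw [hr1, hr2]
    simp only [List.flatMap_append, List.append_assoc, List.flatMap_singleton]
    rw [List.flatMap_congr hbL, List.flatMap_congr hbR, hbM]
    have := pv_insertBy_split (fun a b => decide (key a < key b)) x
      ((PySem.List.pyRange 0 k 1).flatMap (fun v => xs.filter (fun y => key y == v)) ++ xs.filter (fun y => key y == k))
      ((PySem.List.pyRange (k+1) B 1).flatMap (fun v => xs.filter (fun y => key y == v)))
      (by
        intro y hy
        simp only [List.mem_append, List.mem_flatMap, List.mem_filter, beq_iff_eq] at hy
        rcases hy with ⟨v, hv, _, hkey⟩ | ⟨_, hkey⟩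
        · rw [PySem.List.mem_pyRange_one] at hv
          simp only [decide_eq_false_iff_not, not_lt]; omega
        · simp only [decide_eq_false_iff_not, not_lt]; omega)
      (by
        intro y hy
        simp only [List.mem_flatMap, List.mem_filter, beq_iff_eq] at hy
        obtain ⟨v, hv, _, hkey⟩ := hy
        rw [PySem.List.mem_pyRange_one] at hv
        simp only [decide_eq_true_eq]; omega)
    rw [← List.append_assoc, this]
    simp

theorem pv_foldl_flatMap {α β σ : Type} (l : List α) (g : α → List β) (f : σ → β → σ) (init : σ) :
    (l.flatMap g).foldl f init = l.foldl (fun s x => (g x).foldl f s) init := by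
  rw [List.flatMap_def, List.foldl_flatten, List.foldl_map]

-- Counting fold: final counter v is the initial value plus the number of matching elements.
theorem pv_count_build {α : Type} (l : List α) (keyI : α → Int) (L : List Int)
    (h : ∀ x ∈ l, 0 ≤ keyI x ∧ keyI x < L.length) :
    (l.foldl (fun st x => PySem.List.pySetD st (keyI x) (PySem.List.pyGetD st (keyI x) 0 + 1)) L).length = L.length ∧
    ∀ v : Nat, (l.foldl (fun st x => PySem.List.pySetD st (keyI x) (PySem.List.pyGetD st (keyI x) 0 + 1)) L)[v]? =
      L[v]?.map (fun t => t + (l.countP (fun x => keyI x == (v : Int)) : Int)) := by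
  induction l generalizing L with
  | nil =>
    refine ⟨rfl, fun v => ?_⟩
    simp
  | cons x l ih =>
    obtain ⟨hx0, hx1⟩ := h x (by simp)
    have hset : PySem.List.pySetD L (keyI x) (PySem.List.pyGetD L (keyI x) 0 + 1) =
        L.set (keyI x).toNat (PySem.List.pyGetD L (keyI x) 0 + 1) :=
      PySem.List.pySetD_of_nonneg _ _ hx0
    have hlen : (L.set (keyI x).toNat (PySem.List.pyGetD L (keyI x) 0 + 1)).length = L.length := by simp
    obtain ⟨ihlen, ihget⟩ := ih (L.set (keyI x).toNat (PySem.List.pyGetD L (keyI x) 0 + 1))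
      (fun y hy => by rw [hlen]; exact h y (by simp [hy]))
    constructor
    · simp only [List.foldl_cons, hset]
      rw [ihlen, hlen]
    · intro v
      simp only [List.foldl_cons, hset]
      rw [ihget v]
      have hidx : (keyI x).toNat < L.length := by omega
      by_cases hv : (keyI x).toNat = v
      · subst hv
        have hbeq : (keyI x == ((keyI x).toNat : Int)) = true := by rw [beq_iff_eq]; omega
        rw [List.getElem?_set, if_pos rfl, if_pos hidx]
        have hget : PySem.List.pyGetD L (keyI x) 0 = L[(keyI x).toNat] :=
          PySem.List.pyGetD_eq_getElem L 0 hx0 (by exact_mod_cast hx1)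
        rw [hget, List.getElem?_eq_getElem hidx]
        simp only [Option.map_some, List.countP_cons, hbeq, if_true]
        congr 1
        push_cast
        ring
      · have hbeq : (keyI x == (v : Int)) = false := by
          rw [beq_eq_false_iff_ne]
          intro hc
          exact hv (by omega)
        rw [List.getElem?_set, if_neg hv]
        simp only [List.countP_cons, hbeq]
        rfl

-- Edges are well formed under Pre_.
theorem pv_wf (bipartite_graph : List (Int × List Int)) (component_demands : List Int) (generation : List Int)
    (hpre : Pre_optimize_power_distribution_refined bipartite_graph component_demands generation) :
    ∀ e ∈ pvE bipartite_graph,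
      (0 ≤ e.1 ∧ e.1 < (component_demands.length : Int)) ∧ (0 ≤ e.2 ∧ e.2 < (generation.length : Int)) := by
  intro e he
  simp only [pvE, List.mem_flatMap, List.mem_map] at he
  obtain ⟨t, ht, c, hc, rfl⟩ := he
  set d := PySem.Dict.ofList bipartite_graph with hd
  rw [PySem.List.mem_enumerate_iff] at ht
  obtain ⟨k, hk, rfl⟩ := ht
  have hkeys : d.keys = d.items.map (fun p => p.1) := rfl
  have hklen : k < d.items.length := by
    simpa [hkeys] using hk
  have hkey : d.keys[k] = d.items[k].1 := by
    simp [hkeys]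
  have hmem : (d.items[k].1, d.items[k].2) ∈ d.items := by
    have h := List.getElem_mem hklen
    rwa [show d.items[k] = (d.items[k].1, d.items[k].2) from rfl] at h
  have hget : d.getD d.keys[k] [] = d.items[k].2 := by
    rw [hkey]
    exact PySem.Dict.getD_of_mem_items d hmem (PySem.Dict.nodup_keys_ofList bipartite_graph) []
  have hitem : ((0 + (k : Int)), d.items[k]) ∈ PySem.List.enumerate d.items 0 := by
    rw [PySem.List.mem_enumerate_iff]
    exact ⟨k, hklen, rfl⟩
  have := hpre _ hitem c (by rw [← hget]; simpa using hc)
  simp only [PySem.List.len_eq] at this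
  refine ⟨⟨this.1.1, this.1.2⟩, ⟨by simp, ?_⟩⟩
  have := this.2
  omega

theorem pv_update_mem {s : PySem.Set Int} {l : List Int} (h : ∀ x ∈ l, x ∈ s) :
    PySem.Set.update s l = s := by
  induction l with
  | nil => rfl
  | cons x l ih =>
    have hx : PySem.Set.add s x = s := by
      simp [PySem.Set.add, List.contains_eq_mem, h x (by simp)]
    show PySem.Set.update (PySem.Set.add s x) l = s
    rw [hx]
    exact ih (fun y hy => h y (by simp [hy]))

theorem pv_getD_init (r : List Int) (c : Int) :
    ((r.foldl (fun acc c => acc.insert c ([] : List Int)) PySem.Dict.empty).getD c []) = [] := by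
  set d := r.foldl (fun acc c => acc.insert c ([] : List Int)) PySem.Dict.empty with hd
  have hnodup : d.keys.Nodup := by
    rw [hd]
    exact PySem.Dict.nodup_keys_foldl_insert r (fun _ _ => []) PySem.Dict.empty (by simp)
  by_cases hc : d.contains c
  · rw [PySem.Dict.contains_eq_isSome_get?] at hc
    obtain ⟨v, hv⟩ := Option.isSome_iff_exists.mp hc
    have hmem := (PySem.Dict.get?_eq_some_iff_mem_items d c v hnodup).mp hv
    have hval : v = [] := by
      have : ∀ p ∈ d.items, p.2 = ([] : List Int) := by
        rw [hd]
        clear hd hnodup hc hv hmem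
        induction r using List.reverseRecOn with
        | nil =>
          intro p hp
          simp only [List.foldl_nil] at hp
          exact absurd hp (by simp [PySem.Dict.empty])
        | append_singleton r x ih =>
          intro p hp
          rw [List.foldl_append, List.foldl_cons, List.foldl_nil] at hp
          rcases (PySem.Dict.mem_items_insert _ _ _ _).mp hp with h1 | h2
          · rw [h1]
          · exact ih p h2.1
      exact this (c, v) hmem
    rw [PySem.Dict.getD_eq_get?_getD, hv, hval]
    rfl
  · exact PySem.Dict.getD_of_not_contains d [] (by simpa using hc)

theorem pv_A_eq_canon (bipartite_graph : List (Int × List Int)) (component_demands : List Int) (generation : List Int)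
    (hpre : Pre_optimize_power_distribution_refined bipartite_graph component_demands generation) :
    optimize_power_distribution_refined bipartite_graph component_demands generation =
      pvCanon bipartite_graph component_demands generation := by
  have hwf := pv_wf bipartite_graph component_demands generation hpre
  simp only [optimize_power_distribution_refined, pvCanon]
  set d := PySem.Dict.ofList bipartite_graph with hd
  set nc := PySem.List.len component_demands with hnc
  set ng := PySem.List.len generation with hng
  set ctz0 := (PySem.List.pyRange 0 nc 1).foldl (fun acc c => acc.insert c ([] : List Int)) PySem.Dict.empty with hctz0
  set gtz0 := (PySem.List.pyRange 0 ng 1).foldl (fun acc g => acc.insert g ([] : List Int)) PySem.Dict.empty with hgtz0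
  have h_maps : (PySem.List.enumerate d.keys 0).foldl (fun st t =>
        (d.getD t.2 []).foldl (fun st c =>
          (st.1.modify c [] (fun l => l ++ [t.1]), st.2.modify t.1 [] (fun l => l ++ [c]))) st)
      (ctz0, gtz0) =
      ((pvE bipartite_graph).foldl (fun dct e => dct.modify e.1 [] (fun l => l ++ [e.2])) ctz0,
       (pvE bipartite_graph).foldl (fun dgt e => dgt.modify e.2 [] (fun l => l ++ [e.1])) gtz0) := by
    rw [← PySem.List.foldl_prod_mk
        (f := fun (dct : PySem.Dict Int (List Int)) (e : Int × Int) => dct.modify e.1 [] (fun l => l ++ [e.2]))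
        (g := fun (dgt : PySem.Dict Int (List Int)) (e : Int × Int) => dgt.modify e.2 [] (fun l => l ++ [e.1]))]
    rw [pvE, ← hd, pv_foldl_flatMap]
    simp only [List.foldl_map]
  rw [h_maps]
  set ctz := (pvE bipartite_graph).foldl (fun dct e => dct.modify e.1 [] (fun l => l ++ [e.2])) ctz0 with hctz
  set gtz := (pvE bipartite_graph).foldl (fun dgt e => dgt.modify e.2 [] (fun l => l ++ [e.1])) gtz0 with hgtz
  have h_getD_ctz : ∀ c : Int, ctz.getD c [] = pvCG bipartite_graph c := by
    intro c
    rw [hctz, PySem.Dict.getD_foldl_modify_append, hctz0, pv_getD_init]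
    rfl
  have h_getD_gtz : ∀ g : Int, gtz.getD g [] = ((pvE bipartite_graph).filter (fun e => e.2 == g)).map (fun e => e.1) := by
    intro g
    rw [hgtz, show (List.foldl (fun dgt e => dgt.modify e.2 [] fun l => l ++ [e.1]) gtz0 (pvE bipartite_graph))
        = List.foldl (fun (dgt : PySem.Dict Int (List Int)) (p : Int × Int) => dgt.modify p.1 [] (fun l => l ++ [p.2]))
            gtz0 ((pvE bipartite_graph).map (fun e => (e.2, e.1))) from by rw [List.foldl_map],
      PySem.Dict.getD_foldl_modify_append, hgtz0, pv_getD_init, List.filter_map, List.map_map]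
    rfl
  have h_keys : ctz.keys = PySem.List.pyRange 0 nc 1 := by
    rw [hctz, PySem.Dict.keys_foldl_modify_key (pvE bipartite_graph) (fun e => e.1) []
      (fun dct e => fun l => l ++ [e.2]) ctz0]
    have hk0 : ctz0.keys = PySem.List.pyRange 0 nc 1 := by
      rw [hctz0, PySem.Dict.keys_foldl_insert]
      show PySem.Set.ofList (PySem.List.pyRange 0 nc 1) = PySem.List.pyRange 0 nc 1
      exact PySem.Set.ofList_eq_self_of_nodup _ (PySem.List.nodup_pyRange_one 0 nc)
    rw [hk0]
    apply pv_update_mem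
    intro x hx
    simp only [List.mem_map] at hx
    obtain ⟨e, he, rfl⟩ := hx
    rw [PySem.List.mem_pyRange_one, hnc, PySem.List.len_eq]
    exact ⟨(hwf e he).1.1, (hwf e he).1.2⟩
  have h_keyC : (fun c => PySem.List.len (ctz.getD c [])) = pvCD bipartite_graph := by
    funext c
    rw [h_getD_ctz c, pvCD, PySem.List.len_eq]
  have h_keyG : (fun g => PySem.List.len (gtz.getD g [])) = pvGD bipartite_graph := by
    funext g
    rw [h_getD_gtz g, pvGD, PySem.List.len_eq, List.countP_eq_length_filter]
    simp
  have h_sortedC : PySem.List.sorted (PySem.List.pyRange 0 nc 1) (pvCD bipartite_graph) =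
      pvCompOrder bipartite_graph component_demands := by
    rw [pvCompOrder, ← hnc]
    exact pv_bucket_sorted _ _ _ (fun c _ => by
      constructor
      · simp [pvCD]
      · rw [pvB, PySem.List.len_eq]
        have := List.length_filter_le (fun e => e.1 == c) (pvE bipartite_graph)
        simp only [pvCD, pvCG, List.length_map]
        omega) (by rw [pvB, PySem.List.len_eq]; omega)
  have h_sortedG : ∀ comp : Int, PySem.List.sorted (pvCG bipartite_graph comp) (pvGD bipartite_graph) =
      pvGenOrder bipartite_graph comp := by
    intro comp
    rw [pvGenOrder]
    exact pv_bucket_sorted _ _ _ (fun g _ => by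
      constructor
      · simp [pvGD]
      · rw [pvB, PySem.List.len_eq]
        have := List.countP_le_length (l := pvE bipartite_graph) (p := fun e => e.2 == g)
        simp only [pvGD]
        omega) (by rw [pvB, PySem.List.len_eq]; omega)
  have h_fun : (fun (st : List (List Int) × List Int × List Int) comp =>
      (PySem.List.sorted (ctz.getD comp []) (fun g => PySem.List.len (gtz.getD g []))).foldl (fun st g =>
        if PySem.List.pyGetD st.2.1 g 0 ≤ 0 ∨ PySem.List.pyGetD st.2.2 comp 0 ≤ 0 then st
        else
          (PySem.List.pySetD st.1 g
             (PySem.List.pySetD (PySem.List.pyGetD st.1 g []) comp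
               (PySem.List.pyGetD (PySem.List.pyGetD st.1 g []) comp 0 +
                 min (PySem.List.pyGetD st.2.1 g 0) (PySem.List.pyGetD st.2.2 comp 0))),
           PySem.List.pySetD st.2.1 g (PySem.List.pyGetD st.2.1 g 0 -
                 min (PySem.List.pyGetD st.2.1 g 0) (PySem.List.pyGetD st.2.2 comp 0)),
           PySem.List.pySetD st.2.2 comp (PySem.List.pyGetD st.2.2 comp 0 -
                 min (PySem.List.pyGetD st.2.1 g 0) (PySem.List.pyGetD st.2.2 comp 0)))) st) =
      (fun st comp => (pvGenOrder bipartite_graph comp).foldl (pvStep comp) st) := by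
    funext st comp
    rw [h_getD_ctz comp, h_keyG, h_sortedG comp]
    congr 1
    funext st' g
    simp only [pvStep]
    by_cases hcond : PySem.List.pyGetD st'.2.1 g 0 ≤ 0 ∨ PySem.List.pyGetD st'.2.2 comp 0 ≤ 0
    · rw [if_pos hcond, if_neg (by omega)]
    · rw [if_neg hcond, if_pos (by omega)]
  rw [h_keys, h_keyC, h_sortedC, h_fun]

-- Filtering the first component out of a pair list whose firsts all equal c is a map over pvCG.
theorem pv_filter_fst (l : List (Int × Int)) (c : Int) :
    l.filter (fun e => e.1 == c) =
      ((l.filter (fun e => e.1 == c)).map (fun e => e.2)).map (fun g => (c, g)) := by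
  rw [List.map_map]
  conv_lhs => rw [← List.map_id (l.filter (fun e => e.1 == c))]
  apply List.map_congr_left
  intro e he
  have h1 : e.1 = c := by
    have := (List.mem_filter.mp he).2
    simpa using this
  simp only [id, Function.comp]
  exact Prod.ext (by rw [h1]) rfl

theorem pv_flatMap_if {α β : Type} (l : List α) (p : α → Bool) (g : α → List β) :
    l.flatMap (fun x => if p x then g x else []) = (l.filter p).flatMap g := by
  induction l with
  | nil => rfl
  | cons x l ih =>
    by_cases hx : p x
    · simp [hx, ih]
    · simp [hx, ih]

theorem pv_B_eq_canon (bipartite_graph : List (Int × List Int)) (component_demands : List Int) (generation : List Int)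
    (hpre : Pre_optimize_power_distribution_refined bipartite_graph component_demands generation) :
    optimize_power_distribution_refined_alt bipartite_graph component_demands generation =
      pvCanon bipartite_graph component_demands generation := by
  have hwf := pv_wf bipartite_graph component_demands generation hpre
  simp only [optimize_power_distribution_refined_alt, pvCanon]
  set d := PySem.Dict.ofList bipartite_graph with hd
  set nc := PySem.List.len component_demands with hnc
  set ng := PySem.List.len generation with hng
  have h_edges : (PySem.List.enumerate d.keys 0).foldl (fun acc t =>
      (d.getD t.2 []).foldl (fun acc c => acc ++ [(c, t.1)]) acc) ([] : List (Int × Int)) =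
      pvE bipartite_graph := by
    simp only [PySem.List.foldl_append_singleton_eq_map]
    rw [show (fun (acc : List (Int × Int)) (t : Int × Int) => acc ++ (d.getD t.2 []).map (fun c => (c, t.1)))
        = (fun acc t => acc ++ ((fun t : Int × Int => (d.getD t.2 []).map (fun c => (c, t.1))) t)) from rfl,
      PySem.List.foldl_append_eq_flatMap]
    rw [pvE, ← hd]
    rfl
  rw [h_edges]
  set E := pvE bipartite_graph with hEdef
  rw [PySem.List.foldl_prod_mk
      (f := fun (cd : List Int) (e : Int × Int) => PySem.List.pySetD cd e.1 (PySem.List.pyGetD cd e.1 0 + 1))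
      (g := fun (gd : List Int) (e : Int × Int) => PySem.List.pySetD gd e.2 (PySem.List.pyGetD gd e.2 0 + 1))]
  dsimp only
  have hrep_c : PySem.List.pyRepeat [(0:Int)] nc = List.replicate component_demands.length (0:Int) := by
    rw [PySem.List.pyRepeat_singleton, hnc, PySem.List.len_eq]
    simp
  have hrep_g : PySem.List.pyRepeat [(0:Int)] ng = List.replicate generation.length (0:Int) := by
    rw [PySem.List.pyRepeat_singleton, hng, PySem.List.len_eq]
    simp
  rw [hrep_c, hrep_g]
  set cdeg := E.foldl (fun cd e => PySem.List.pySetD cd e.1 (PySem.List.pyGetD cd e.1 0 + 1))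
    (List.replicate component_demands.length (0:Int)) with hcdeg
  set gdeg := E.foldl (fun gd e => PySem.List.pySetD gd e.2 (PySem.List.pyGetD gd e.2 0 + 1))
    (List.replicate generation.length (0:Int)) with hgdeg
  have hcount_c := pv_count_build E (fun e => e.1) (List.replicate component_demands.length (0:Int))
    (fun e he => by simpa using (hwf e he).1)
  have hcount_g := pv_count_build E (fun e => e.2) (List.replicate generation.length (0:Int))
    (fun e he => by simpa using (hwf e he).2)
  have hlen_c : cdeg.length = component_demands.length := by
    rw [hcdeg, hcount_c.1, List.length_replicate]
  have hlen_g : gdeg.length = generation.length := by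
    rw [hgdeg, hcount_g.1, List.length_replicate]
  have h_cd : ∀ c : Int, 0 ≤ c → c < (component_demands.length : Int) →
      PySem.List.pyGetD cdeg c 0 = pvCD bipartite_graph c := by
    intro c h0 h1
    have hlt : c.toNat < cdeg.length := by omega
    rw [PySem.List.pyGetD_eq_getElem cdeg 0 h0 (by omega)]
    have hv := hcount_c.2 c.toNat
    rw [← hcdeg, List.getElem?_eq_getElem hlt, List.getElem?_replicate, if_pos (by omega)] at hv
    have hv' := Option.some.inj hv
    rw [hv', pvCD, pvCG, List.length_map, ← List.countP_eq_length_filter, ← hEdef]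
    have hc : ((c.toNat : Int)) = c := by omega
    rw [hc]
    ring
  have h_gd : ∀ g : Int, 0 ≤ g → g < (generation.length : Int) →
      PySem.List.pyGetD gdeg g 0 = pvGD bipartite_graph g := by
    intro g h0 h1
    have hlt : g.toNat < gdeg.length := by omega
    rw [PySem.List.pyGetD_eq_getElem gdeg 0 h0 (by omega)]
    have hv := hcount_g.2 g.toNat
    rw [← hgdeg, List.getElem?_eq_getElem hlt, List.getElem?_replicate, if_pos (by omega)] at hv
    have hv' := Option.some.inj hv
    rw [hv', pvGD, ← hEdef]
    have hg : ((g.toNat : Int)) = g := by omega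
    rw [hg]
    ring
  -- bounds on the bucketed keys
  have hGD_bound : ∀ g : Int, 0 ≤ pvGD bipartite_graph g ∧ pvGD bipartite_graph g < pvB bipartite_graph := by
    intro g
    constructor
    · simp [pvGD]
    · rw [pvB, PySem.List.len_eq]
      have := List.countP_le_length (l := pvE bipartite_graph) (p := fun e => e.2 == g)
      simp only [pvGD]
      omega
  have hCD_bound : ∀ c : Int, 0 ≤ pvCD bipartite_graph c ∧ pvCD bipartite_graph c < pvB bipartite_graph := by
    intro c
    constructor
    · simp [pvCD]
    · rw [pvB, PySem.List.len_eq]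
      have := List.length_filter_le (fun e => e.1 == c) (pvE bipartite_graph)
      simp only [pvCD, pvCG, List.length_map]
      omega
  -- pass 1: stable sort by generator degree
  have hS1 : PySem.List.sorted E (fun e => PySem.List.pyGetD gdeg e.2 0) =
      (PySem.List.pyRange 0 (pvB bipartite_graph) 1).flatMap
        (fun v => E.filter (fun e => pvGD bipartite_graph e.2 == v)) := by
    rw [pv_bucket_sorted E (fun e => PySem.List.pyGetD gdeg e.2 0) (pvB bipartite_graph)
      (fun e he => by dsimp only; rw [h_gd e.2 (hwf e he).2.1 (hwf e he).2.2]; exact hGD_bound e.2)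
      (by rw [pvB, PySem.List.len_eq]; omega)]
    apply List.flatMap_congr
    intro v _
    apply List.filter_congr
    intro e he
    dsimp only
    rw [h_gd e.2 (hwf e he).2.1 (hwf e he).2.2]
  set S1 := PySem.List.sorted E (fun e => PySem.List.pyGetD gdeg e.2 0) with hS1def
  have hS1mem : ∀ e ∈ S1, e ∈ E := by
    intro e he
    rw [hS1def, PySem.List.mem_sorted] at he
    exact he
  -- pass 2: stable sort by component index; per-component groups appear in the pass-1 order
  have hS2 : PySem.List.sorted S1 (fun e => e.1) =
      (PySem.List.pyRange 0 nc 1).flatMap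
        (fun c => (pvGenOrder bipartite_graph c).map (fun g => (c, g))) := by
    rw [pv_bucket_sorted S1 (fun e => e.1) nc
      (fun e he => by
        have := (hwf e (hS1mem e he)).1
        dsimp only
        rw [hnc, PySem.List.len_eq]
        exact this)
      (by rw [hnc, PySem.List.len_eq]; omega)]
    apply List.flatMap_congr
    intro c _
    rw [hS1, List.filter_flatMap]
    have hgrp : ∀ v : Int, (E.filter (fun e => pvGD bipartite_graph e.2 == v)).filter (fun e => e.1 == c) =
        ((pvCG bipartite_graph c).filter (fun g => pvGD bipartite_graph g == v)).map (fun g => (c, g)) := by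
      intro v
      rw [List.filter_comm]
      conv_lhs => rw [hEdef, pv_filter_fst (pvE bipartite_graph) c]
      rw [List.filter_map, ← pvCG]
      rfl
    rw [List.flatMap_congr (fun v _ => hgrp v), pvGenOrder, List.map_flatMap]
  have hS2mem : ∀ e ∈ PySem.List.sorted S1 (fun e => e.1), e ∈ E := by
    intro e he
    rw [PySem.List.mem_sorted] at he
    exact hS1mem e he
  -- pass 3: stable sort by component degree; groups line up in pvCompOrder
  have hS3 : PySem.List.sorted (PySem.List.sorted S1 (fun e => e.1)) (fun e => PySem.List.pyGetD cdeg e.1 0) =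
      (pvCompOrder bipartite_graph component_demands).flatMap
        (fun c => (pvGenOrder bipartite_graph c).map (fun g => (c, g))) := by
    rw [pv_bucket_sorted (PySem.List.sorted S1 (fun e => e.1)) (fun e => PySem.List.pyGetD cdeg e.1 0) (pvB bipartite_graph)
      (fun e he => by
        dsimp only
        rw [h_cd e.1 (hwf e (hS2mem e he)).1.1 (hwf e (hS2mem e he)).1.2]
        exact hCD_bound e.1)
      (by rw [pvB, PySem.List.len_eq]; omega)]
    have hfc : ∀ v : Int, (PySem.List.sorted S1 (fun e => e.1)).filter (fun e => PySem.List.pyGetD cdeg e.1 0 == v) =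
        (PySem.List.sorted S1 (fun e => e.1)).filter (fun e => pvCD bipartite_graph e.1 == v) := by
      intro v
      apply List.filter_congr
      intro e he
      dsimp only
      rw [h_cd e.1 (hwf e (hS2mem e he)).1.1 (hwf e (hS2mem e he)).1.2]
    rw [List.flatMap_congr (fun v _ => hfc v)]
    have hstep : ∀ v : Int, (PySem.List.sorted S1 (fun e => e.1)).filter (fun e => pvCD bipartite_graph e.1 == v) =
        ((PySem.List.pyRange 0 nc 1).filter (fun c => pvCD bipartite_graph c == v)).flatMap
          (fun c => (pvGenOrder bipartite_graph c).map (fun g => (c, g))) := by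
      intro v
      rw [hS2, List.filter_flatMap]
      rw [← pv_flatMap_if]
      apply List.flatMap_congr
      intro c _
      rw [List.filter_map]
      by_cases hcv : pvCD bipartite_graph c == v
      · rw [if_pos hcv]
        congr 1
        apply List.filter_eq_self.mpr
        intro g _
        simpa using hcv
      · rw [if_neg hcv]
        rw [show (pvGenOrder bipartite_graph c).filter
            ((fun e => pvCD bipartite_graph e.1 == v) ∘ (fun g => (c, g))) = [] from ?_, List.map_nil]
        apply List.filter_eq_nil_iff.mpr
        intro g _
        simpa using hcv
    rw [List.flatMap_congr (fun v _ => hstep v), ← List.flatMap_assoc, pvCompOrder, ← hnc]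
  rw [hS3]
  -- fold the flat pass back into the canonical nested fold
  rw [pv_foldl_flatMap]
  have hfold : (fun (s : List (List Int) × List Int × List Int) c =>
      ((pvGenOrder bipartite_graph c).map (fun g => (c, g))).foldl (fun st e =>
        if 0 < min (PySem.List.pyGetD st.2.1 e.2 0) (PySem.List.pyGetD st.2.2 e.1 0) then
          (PySem.List.pySetD st.1 e.2
             (PySem.List.pySetD (PySem.List.pyGetD st.1 e.2 []) e.1
               (PySem.List.pyGetD (PySem.List.pyGetD st.1 e.2 []) e.1 0 +
                 min (PySem.List.pyGetD st.2.1 e.2 0) (PySem.List.pyGetD st.2.2 e.1 0))),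
           PySem.List.pySetD st.2.1 e.2 (PySem.List.pyGetD st.2.1 e.2 0 -
                 min (PySem.List.pyGetD st.2.1 e.2 0) (PySem.List.pyGetD st.2.2 e.1 0)),
           PySem.List.pySetD st.2.2 e.1 (PySem.List.pyGetD st.2.2 e.1 0 -
                 min (PySem.List.pyGetD st.2.1 e.2 0) (PySem.List.pyGetD st.2.2 e.1 0)))
        else st) s) =
      (fun s c => (pvGenOrder bipartite_graph c).foldl (pvStep c) s) := by
    funext s c
    rw [List.foldl_map]
    rfl
  rw [hfold]

-- ===== VERDICT (by name: the statement is the Claim_ definition above) =====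
theorem optimize_power_distribution_refined_spec : Claim_equal_optimize_power_distribution_refined := by
  intro bg dem gen _ hpre
  unfold Spec_optimize_power_distribution_refined
  rw [pv_A_eq_canon bg dem gen hpre, pv_B_eq_canon bg dem gen hpre]
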